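-- pv_equiv track=rewrite | github.com/David-Tong/leetcode-in-python | 372-super pow/main.py | superPow
-- ===== SOURCE A (Python) =====
-- def superPow(a, b):
--     """
--     :type a: int
--     :type b: List[int]
--     :rtype: int
--     """
--     MODULO = 1337
--     L = len(b)
--
--     # start calculation
--     a = a % MODULO
--     ans = 1
--     for x in range(L):
--         ans = pow(ans, 10) * pow(a, b[x]) % MODULO
--     return ans
-- ===== SOURCE B (Python) =====
-- def superPow(a, b):
--     """
--     :type a: int
--     :type b: List[int]
--     :rtype: int
--     """
--     e = 0
--     for d in b:
--         e = e * 10 + d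
--     base = a % 1337
--     r = 1
--     while e > 0:
--         if e & 1:
--             r = r * base % 1337
--         base = base * base % 1337
--         e >>= 1
--     return r
-- ===== Notes on version B (the rewrite author's own statement) =====
-- stated objective: alternative
-- what changed: B rebuilds the whole exponent from the digit list with one Horner fold and then runs a single binary exponentiation-by-squaring loop mod 1337, replacing A's per-digit loop that computes full-size unreduced powers pow(ans,10)*pow(a,d) each step.
-- outside the precondition, e.g. on superPow(2, [-1]): A returns 0.5, B returns 1
import Mathlib
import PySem

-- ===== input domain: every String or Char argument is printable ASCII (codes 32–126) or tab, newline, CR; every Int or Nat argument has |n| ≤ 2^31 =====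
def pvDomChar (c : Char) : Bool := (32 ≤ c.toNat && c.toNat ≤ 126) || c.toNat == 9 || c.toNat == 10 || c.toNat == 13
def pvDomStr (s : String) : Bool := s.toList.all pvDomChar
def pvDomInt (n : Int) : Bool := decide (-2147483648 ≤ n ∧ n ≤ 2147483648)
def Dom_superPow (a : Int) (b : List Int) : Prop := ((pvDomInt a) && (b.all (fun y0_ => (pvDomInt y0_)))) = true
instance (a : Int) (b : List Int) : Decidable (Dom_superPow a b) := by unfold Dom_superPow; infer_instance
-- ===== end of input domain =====

-- B rebuilds the exponent with one Horner fold over the digits, then one binary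
-- exponentiation-by-squaring loop mod 1337, replacing A's per-digit pow(ans,10)*pow(a,d)%1337 loop.


-- ===== PORT A =====
-- A: a = a % 1337; ans = 1; for each digit d: ans = pow(ans,10) * pow(a,d) % 1337.
-- pow(a, d) with d ≥ 0 (guaranteed by Pre_) is integer power; the port is exact there.
def superPow (a : Int) (b : List Int) : Int :=
  let a' := PySem.Int.mod a 1337
  b.foldl (fun ans d => PySem.Int.mod (ans ^ 10 * a' ^ d.toNat) 1337) 1

-- ===== PORT B =====
-- B's while-loop 'while e > 0: if e & 1: r = r*base % 1337; base = base*base % 1337; e >>= 1'.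
-- A non-positive Python e runs the loop zero times, exactly as e.toNat = 0 does here.
def superPowLoop (e : Nat) (base r : Int) : Int :=
  if e = 0 then r
  else superPowLoop (e / 2) (PySem.Int.mod (base * base) 1337)
    (if e % 2 = 1 then PySem.Int.mod (r * base) 1337 else r)
decreasing_by exact Nat.div_lt_self (Nat.pos_of_ne_zero (by assumption)) (by norm_num)

-- B: e = Horner fold of the digits; base = a % 1337; r = 1; binary pow loop; return r.
def superPow_alt (a : Int) (b : List Int) : Int :=
  let e := b.foldl (fun e d => e * 10 + d) 0
  superPowLoop e.toNat (PySem.Int.mod a 1337) 1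

-- ===== PRECONDITION & SPEC =====
-- Pre_ excludes negative digits: there A's two-arg pow(a, d) yields a float (or raises
-- ZeroDivisionError for a ≡ 0), not a value of the declared int type.
def Pre_superPow (a : Int) (b : List Int) : Prop := ∀ d ∈ b, 0 ≤ d
instance (a : Int) (b : List Int) : Decidable (Pre_superPow a b) := by unfold Pre_superPow; infer_instance
def pvWitness_superPow : Int × List Int := (2, [1, 0])

def Spec_superPow (a : Int) (b : List Int) (out : Int) : Prop := out = superPow_alt a b
instance (a : Int) (b : List Int) (out : Int) : Decidable (Spec_superPow a b out) := by unfold Spec_superPow; infer_instance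

-- ===== CLAIM (what is proved, stated in full; the proofs are below) =====
def Claim_equal_superPow : Prop := ∀ (a : Int) (b : List Int), Dom_superPow a b → Pre_superPow a b → Spec_superPow a b (superPow a b)

-- ===== LEMMAS AND PROOFS =====

-- (a % m)^n % m = a^n % m for m = 1337, the fact both reductions of the base rely on.
theorem emod_pow_emod_1337 (a : Int) (n : Nat) : (a % 1337) ^ n % 1337 = a ^ n % 1337 := by
  induction n with
  | zero => simp
  | succ k ih =>
      rw [pow_succ, pow_succ, Int.mul_emod, ih, Int.emod_emod_of_dvd _ dvd_rfl, ← Int.mul_emod]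

-- B's squaring loop computes r * base^e reduced mod 1337.
theorem superPowLoop_eq (e : Nat) : ∀ (base r : Int),
    superPowLoop e (base % 1337) (r % 1337) = r * base ^ e % 1337 := by
  induction e using Nat.strong_induction_on with
  | _ e ih =>
      intro base r
      rw [superPowLoop]
      by_cases h0 : e = 0
      · simp [h0]
      · rw [if_neg h0]
        simp only [PySem.Int.mod_eq_emod_of_pos (show (0:Int) < 1337 by norm_num)]
        have hlt : e / 2 < e := Nat.div_lt_self (Nat.pos_of_ne_zero h0) (by norm_num)
        have hb : (base % 1337) * (base % 1337) % 1337 = (base * base) % 1337 := by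
          rw [← Int.mul_emod]
        have hsplit : base ^ e = (base * base) ^ (e / 2) * base ^ (e % 2) := by
          rw [← sq, ← pow_mul, ← pow_add, Nat.div_add_mod]
        rcases Nat.mod_two_eq_zero_or_one e with hpar | hpar
        · rw [hpar, if_neg (by decide), hb,
            ih (e / 2) hlt (base * base) r, hsplit, hpar, pow_zero, mul_one]
        · rw [hpar, if_pos rfl, hb, ← Int.mul_emod,
            ih (e / 2) hlt (base * base) (r * base), hsplit, hpar, pow_one]
          ring_nf

-- A's loop invariant: starting from a'^n mod 1337 it ends at a'^(Horner value) mod 1337.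
theorem superPow_loop_inv (a' : Int) (b : List Int) (hb : ∀ d ∈ b, 0 ≤ d) :
    ∀ (e : Int), 0 ≤ e →
      b.foldl (fun ans d => PySem.Int.mod (ans ^ 10 * a' ^ d.toNat) 1337)
        ((a' ^ e.toNat) % 1337)
      = (a' ^ (b.foldl (fun e d => e * 10 + d) e).toNat) % 1337 := by
  induction b with
  | nil => intro e _; simp
  | cons d t ih =>
      intro e he
      have hd : 0 ≤ d := hb d (List.mem_cons_self ..)
      have ht : ∀ x ∈ t, 0 ≤ x := fun x hx => hb x (List.mem_cons_of_mem _ hx)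
      have he' : (0:Int) ≤ e * 10 + d := by positivity
      have hstep : PySem.Int.mod ((a' ^ e.toNat % 1337) ^ 10 * a' ^ d.toNat) 1337
          = a' ^ (e * 10 + d).toNat % 1337 := by
        rw [PySem.Int.mod_eq_emod_of_pos (by norm_num)]
        have : (e * 10 + d).toNat = e.toNat * 10 + d.toNat := by omega
        rw [this, pow_add, pow_mul, Int.mul_emod, emod_pow_emod_1337, ← Int.mul_emod]
      simp only [List.foldl_cons]
      rw [hstep]
      exact ih ht (e * 10 + d) he'

theorem superPow_eq (a : Int) (b : List Int) (hb : ∀ d ∈ b, 0 ≤ d) :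
    superPow a b = superPow_alt a b := by
  unfold superPow superPow_alt
  have h1337 : (0:Int) < 1337 := by norm_num
  have h := superPow_loop_inv (PySem.Int.mod a 1337) b hb 0 le_rfl
  simp only [Int.toNat_zero, pow_zero] at h
  have h1 : (1:Int) % 1337 = 1 := by norm_num
  rw [h1] at h
  have halt : superPowLoop (b.foldl (fun e d => e * 10 + d) 0).toNat (PySem.Int.mod a 1337) 1 =
      1 * a ^ (b.foldl (fun e d => e * 10 + d) 0).toNat % 1337 := by
    conv_lhs =>
      rw [PySem.Int.mod_eq_emod_of_pos h1337, show (1:Int) = 1 % 1337 from rfl]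
    exact superPowLoop_eq _ a 1
  rw [h, halt, one_mul, PySem.Int.mod_eq_emod_of_pos h1337, emod_pow_emod_1337]

-- ===== VERDICT (by name: the statement is the Claim_ definition above) =====
theorem superPow_spec : Claim_equal_superPow := by
  intro a b _ hpre
  exact superPow_eq a b hpre
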